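-- pv_equiv track=rewrite | github.com/HowieHz/osu-beatmap-to-mania-converter | src/processor/metadata_converter/any_metadata_remove_sv.py | any_metadata_remove_sv
-- ===== SOURCE A (Python) =====
-- from typing import cast
--
-- def any_metadata_remove_sv(
--     remove_sv_option: str, osu_file_metadata: list[str]
-- ) -> list[str]:
--     """移除元数据中的变速
--
--     Args:
--         remove_sv_option (str): 是否移除铺面变速（可选项：全移除 - all，不移除 - none，仅移除继承时间点（绿线） - inherited_timing_points）
--         osu_file_metadata (list[str]): 未被转换的元数据列，每行应有换行符（"\\n"）
--
--     Returns:
--         list[str]: 转换后的元数据列，每行应有换行符（"\\n"）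
--     """
--     if remove_sv_option == "none":
--         return osu_file_metadata
--
--     marked_osu_file_metadata = cast(
--         list[str | None], osu_file_metadata
--     )  # None 是被标记要被移除的行
--     remove_line_flag: bool = False
--     skip_line_flag: int = 0
--     ret_osu_file_metadata: list[str]
--
--     if remove_sv_option == "all":
--         for index, line in enumerate(osu_file_metadata):
--             if skip_line_flag > 0:
--                 skip_line_flag -= 1
--                 continue
--
--             if line.rstrip() == "[TimingPoints]":  # 识别到 TimingPoints
--                 remove_line_flag = True
--                 skip_line_flag = 1  # 跳过第一行红线
--                 continue
--
--             if line.rstrip() == "" and remove_line_flag:  # 读取到 TimingPoints 末了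
--                 break
--
--             if remove_line_flag:
--                 marked_osu_file_metadata[index] = (
--                     None  # 要是这里直接 remove 会导致索引错乱，标记为 None，待会统一清理
--                 )
--
--         ret_osu_file_metadata = list(filter(None, marked_osu_file_metadata))
--     elif remove_sv_option == "inherited_timing_points":
--         for index, line in enumerate(osu_file_metadata):
--             if skip_line_flag > 0:
--                 skip_line_flag -= 1
--                 continue
--
--             if line.rstrip() == "[TimingPoints]":  # 识别到 TimingPoints
--                 remove_line_flag = True
--                 skip_line_flag = 1  # 跳过第一行红线
--                 continue
--
--             if line.rstrip() == "" and remove_line_flag:  # 读取到 TimingPoints 末了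
--                 break
--
--             if remove_line_flag and line.rstrip().split(",")[-2] == "0":
--                 marked_osu_file_metadata[index] = (
--                     None  # 要是这里直接 remove 会导致索引错乱，标记为 None，待会统一清理
--                 )
--
--         ret_osu_file_metadata = list(filter(None, marked_osu_file_metadata))
--
--     return ret_osu_file_metadata
-- ===== SOURCE B (Python) =====
-- # B: single forward pass handing an iterator between a scanning phase and a block-copying
-- # phase, building the output directly (no in-place None-marking of the input, no second
-- # filter pass over a mutated list). NOTE: unlike A, B does not mutate its argument.
--
-- def _copy_block(it, out, all_mode):
--     for line in it:
--         stripped = line.rstrip()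
--         if stripped == "[TimingPoints]":
--             out.append(line)
--             nxt = next(it, None)
--             if nxt is not None:
--                 out.append(nxt)
--         elif stripped == "":
--             out.append(line)
--             return
--         elif not all_mode and stripped.split(",")[-2] != "0":
--             out.append(line)
--
--
-- def any_metadata_remove_sv(remove_sv_option, osu_file_metadata):
--     if remove_sv_option == "none":
--         return osu_file_metadata
--     if remove_sv_option not in ("all", "inherited_timing_points"):
--         raise ValueError("unknown remove_sv_option: %r" % (remove_sv_option,))
--     all_mode = remove_sv_option == "all"
--     out = []
--     it = iter(osu_file_metadata)
--     for line in it: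
--         out.append(line)
--         if line.rstrip() == "[TimingPoints]":
--             nxt = next(it, None)
--             if nxt is not None:
--                 out.append(nxt)
--             _copy_block(it, out, all_mode)
--             out.extend(it)
--             break
--     return [l for l in out if l]
-- ===== Notes on version B (the rewrite author's own statement) =====
-- stated objective: alternative
-- what changed: A marks block lines as None in place (flag/skip state over enumerate, mutating the input) and then runs a truthiness filter over the whole mutated list; B never mutates and builds the result in one forward pass split into a scan-to-header phase and a block-copy phase that hand the remaining lines to each other.
import Mathlib
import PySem

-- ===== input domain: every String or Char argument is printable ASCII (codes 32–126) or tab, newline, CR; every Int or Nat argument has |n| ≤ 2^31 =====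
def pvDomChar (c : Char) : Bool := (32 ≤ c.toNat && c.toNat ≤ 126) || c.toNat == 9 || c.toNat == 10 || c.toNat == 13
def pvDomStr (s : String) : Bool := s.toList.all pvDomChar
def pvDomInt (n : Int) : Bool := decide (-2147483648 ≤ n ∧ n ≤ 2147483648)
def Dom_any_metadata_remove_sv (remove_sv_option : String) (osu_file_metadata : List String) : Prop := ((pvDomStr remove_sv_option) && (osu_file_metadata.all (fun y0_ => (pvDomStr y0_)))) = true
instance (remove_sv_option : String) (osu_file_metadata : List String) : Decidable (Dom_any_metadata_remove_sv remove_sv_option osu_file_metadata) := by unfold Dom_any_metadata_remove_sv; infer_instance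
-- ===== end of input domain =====

-- B replaces A's in-place None-marking (flag/skip state over enumerate, then a
-- truthiness filter over the mutated list) by a single forward pass in two phases
-- (scan-to-header, then copy-block) that builds the output directly; equivalence is
-- about the RETURN value only (Python A additionally mutates its list argument).

-- ===== PORT A =====
-- line.rstrip().split(",")[-2] == "0"; on IndexError (fewer than 2 pieces) Python raises —
-- those inputs are outside Pre_; the port uses "" there (the line is then kept).
def pvAInhCond (line : String) : Bool :=
  ((PySem.List.pyGet? ((PySem.Str.split? (PySem.Str.rstrip line) ",").getD []) (-2)).getD "") == "0"

-- the 'all' loop of A: marked list mutated by index, remove/skip flags, break on blank line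
def pvALoopAll : List (Option String) → List (Int × String) → Bool → Int → List (Option String)
  | marked, [], _, _ => marked
  | marked, (idx, line) :: rest, flag, skip =>
    if skip > 0 then pvALoopAll marked rest flag (skip - 1)
    else if PySem.Str.rstrip line == "[TimingPoints]" then pvALoopAll marked rest true 1
    else if PySem.Str.rstrip line == "" && flag then marked  -- break
    else if flag then pvALoopAll (PySem.List.pySetD marked idx none) rest flag skip
    else pvALoopAll marked rest flag skip

-- the 'inherited_timing_points' loop of A (same shape, extra split-based condition)
def pvALoopInh : List (Option String) → List (Int × String) → Bool → Int → List (Option String)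
  | marked, [], _, _ => marked
  | marked, (idx, line) :: rest, flag, skip =>
    if skip > 0 then pvALoopInh marked rest flag (skip - 1)
    else if PySem.Str.rstrip line == "[TimingPoints]" then pvALoopInh marked rest true 1
    else if PySem.Str.rstrip line == "" && flag then marked  -- break
    else if flag && pvAInhCond line then pvALoopInh (PySem.List.pySetD marked idx none) rest flag skip
    else pvALoopInh marked rest flag skip

-- list(filter(None, marked)): drop None and drop falsy (empty) strings
def pvFilterTruthy (marked : List (Option String)) : List String :=
  (marked.filterMap id).filter (fun s => s ≠ "")

def any_metadata_remove_sv (remove_sv_option : String) (osu_file_metadata : List String) : List String :=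
  if remove_sv_option == "none" then osu_file_metadata
  else if remove_sv_option == "all" then
    pvFilterTruthy (pvALoopAll (osu_file_metadata.map some) (PySem.List.enumerate osu_file_metadata) false 0)
  else if remove_sv_option == "inherited_timing_points" then
    pvFilterTruthy (pvALoopInh (osu_file_metadata.map some) (PySem.List.enumerate osu_file_metadata) false 0)
  else []  -- Python raises UnboundLocalError here; outside Pre_

-- ===== PORT B =====
-- B keeps an in-block line iff not all_mode and split(",")[-2] != "0" (port uses "" on the
-- IndexError inputs, which are outside Pre_; the line is then kept, as in port A).
def pvBKeep (allMode : Bool) (stripped : String) : Bool :=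
  !allMode && ((PySem.List.pyGet? ((PySem.Str.split? stripped ",").getD []) (-2)).getD "") != "0"

-- _copy_block: consume lines after the kept header+first line, until a blank line;
-- pvBHdrTail is the 'nxt = next(it, None); out.append(nxt)' step shared with the scan phase
mutual
def pvBBlock (allMode : Bool) : List String → List String
  | [] => []
  | line :: rest =>
    if PySem.Str.rstrip line == "[TimingPoints]" then line :: pvBHdrTail allMode rest
    else if PySem.Str.rstrip line == "" then line :: rest  -- stop; remaining lines copied as-is
    else if pvBKeep allMode (PySem.Str.rstrip line) then line :: pvBBlock allMode rest
    else pvBBlock allMode rest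
def pvBHdrTail (allMode : Bool) : List String → List String
  | [] => []
  | nxt :: rest' => nxt :: pvBBlock allMode rest'
end

-- the top-level scan: copy lines until the header, then hand over to the block phase
def pvBScan (allMode : Bool) : List String → List String
  | [] => []
  | line :: rest =>
    if PySem.Str.rstrip line == "[TimingPoints]" then line :: pvBHdrTail allMode rest
    else line :: pvBScan allMode rest

def any_metadata_remove_sv_alt (remove_sv_option : String) (osu_file_metadata : List String) : List String :=
  if remove_sv_option == "none" then osu_file_metadata
  else (pvBScan (remove_sv_option == "all") osu_file_metadata).filter (fun s => s ≠ "")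

-- ===== PRECONDITION & SPEC =====
-- Which lines does A's inherited loop actually split? Only the lines inside the
-- TimingPoints block: after the first header and its skipped successor, every line up to
-- the first blank line, excluding further header lines and their skipped successors.
-- pvPreScan/pvPreSkip/pvPreBlock walk exactly those positions and demand each split line
-- contain a comma (split(",") then has ≥ 2 pieces, so [-2] exists); they compute no output.
mutual
def pvPreScan : List String → Bool
  | [] => true
  | l :: rest =>
    if PySem.Str.rstrip l == "[TimingPoints]" then pvPreSkip rest else pvPreScan rest
def pvPreSkip : List String → Bool
  | [] => true
  | _ :: rest => pvPreBlock rest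
def pvPreBlock : List String → Bool
  | [] => true
  | l :: rest =>
    if PySem.Str.rstrip l == "[TimingPoints]" then pvPreSkip rest
    else if PySem.Str.rstrip l == "" then true
    else (PySem.Str.rstrip l).toList.contains ',' && pvPreBlock rest
end

-- Pre_ excludes exactly the inputs on which Python A raises: option strings other than
-- the three documented ones (UnboundLocalError), and, in inherited mode, lists whose
-- TimingPoints block contains a comma-less non-blank non-header line before the blank
-- terminator (IndexError from split(",")[-2]); B raises on exactly the same inputs.
def Pre_any_metadata_remove_sv (remove_sv_option : String) (osu_file_metadata : List String) : Prop :=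
  remove_sv_option = "none" ∨ remove_sv_option = "all" ∨
  (remove_sv_option = "inherited_timing_points" ∧ pvPreScan osu_file_metadata = true)

instance (remove_sv_option : String) (osu_file_metadata : List String) : Decidable (Pre_any_metadata_remove_sv remove_sv_option osu_file_metadata) := by unfold Pre_any_metadata_remove_sv; infer_instance

def pvWitness_any_metadata_remove_sv : String × List String :=
  ("inherited_timing_points", ["[TimingPoints]", "100,320,4,1,0,50,1,0", "200,-50,4,1,0,50,0,0", ""])

def Spec_any_metadata_remove_sv (remove_sv_option : String) (osu_file_metadata : List String) (out : List String) : Prop := out = any_metadata_remove_sv_alt remove_sv_option osu_file_metadata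
instance (remove_sv_option : String) (osu_file_metadata : List String) (out : List String) : Decidable (Spec_any_metadata_remove_sv remove_sv_option osu_file_metadata out) := by unfold Spec_any_metadata_remove_sv; infer_instance

-- ===== CLAIM (what is proved, stated in full; the proofs are below) =====
def Claim_equal_any_metadata_remove_sv : Prop := ∀ (remove_sv_option : String) (osu_file_metadata : List String), Dom_any_metadata_remove_sv remove_sv_option osu_file_metadata → Pre_any_metadata_remove_sv remove_sv_option osu_file_metadata → Spec_any_metadata_remove_sv remove_sv_option osu_file_metadata (any_metadata_remove_sv remove_sv_option osu_file_metadata)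

-- ===== LEMMAS AND PROOFS =====

-- direct-recursion reformulation of A's marking loop (parametric in the mode)
def pvMark (allMode : Bool) : Bool → Int → List String → List (Option String)
  | _, _, [] => []
  | flag, skip, line :: rest =>
    if skip > 0 then some line :: pvMark allMode flag (skip - 1) rest
    else if PySem.Str.rstrip line == "[TimingPoints]" then some line :: pvMark allMode true 1 rest
    else if PySem.Str.rstrip line == "" && flag then some line :: rest.map some
    else if flag && !pvBKeep allMode (PySem.Str.rstrip line) then none :: pvMark allMode flag skip rest
    else some line :: pvMark allMode flag skip rest

lemma pvSetLen {α : Type} (done : List α) (a b : α) (t : List α) :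
    (done ++ a :: t).set done.length b = done ++ b :: t := by
  induction done with
  | nil => simp
  | cons x xs ih => simp [ih]

lemma pvALoopAll_eq (lines : List String) : ∀ (done : List (Option String)) (flag : Bool) (skip : Int),
    pvALoopAll (done ++ lines.map some) (PySem.List.enumerate lines done.length) flag skip
      = done ++ pvMark true flag skip lines := by
  induction lines with
  | nil => intro done flag skip; simp [pvALoopAll, pvMark, PySem.List.enumerate_nil]
  | cons l rest ih =>
    intro done flag skip
    rw [PySem.List.enumerate_cons]
    show pvALoopAll (done ++ some l :: rest.map some) _ flag skip = _
    rw [pvALoopAll]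
    have hre : (done.length : Int) + 1 = ((done ++ [some l]).length : Int) := by simp
    have hd : done ++ some l :: rest.map some = (done ++ [some l]) ++ rest.map some := by simp
    split_ifs with h1 h2 h3 h4
    · rw [hd, hre, ih]; simp [pvMark, h1]
    · rw [hd, hre, ih]; simp [pvMark, h1, h2]
    · simp [pvMark, h1, h2, h3]
    · rw [show PySem.List.pySetD (done ++ some l :: rest.map some) (done.length : Int) none
            = (done ++ [none]) ++ rest.map some by
          simp [pvSetLen done (some l) none (rest.map some)]]
      rw [hre]
      have : ((done ++ [some l]).length : Int) = ((done ++ [none]).length : Int) := by simp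
      rw [this, ih]
      simp only [pvMark, if_neg h1, if_neg h2, if_neg h3]
      have hcondAll : (flag && !pvBKeep true (PySem.Str.rstrip l)) = flag := by
        simp [pvBKeep]
      rw [hcondAll, if_pos h4]; simp
    · rw [hd, hre, ih]
      simp only [pvMark, if_neg h1, if_neg h2, if_neg h3]
      have hcondAll : (flag && !pvBKeep true (PySem.Str.rstrip l)) = flag := by
        simp [pvBKeep]
      rw [hcondAll, if_neg h4]; simp

lemma pvALoopInh_eq (lines : List String) : ∀ (done : List (Option String)) (flag : Bool) (skip : Int),
    pvALoopInh (done ++ lines.map some) (PySem.List.enumerate lines done.length) flag skip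
      = done ++ pvMark false flag skip lines := by
  induction lines with
  | nil => intro done flag skip; simp [pvALoopInh, pvMark, PySem.List.enumerate_nil]
  | cons l rest ih =>
    intro done flag skip
    rw [PySem.List.enumerate_cons]
    show pvALoopInh (done ++ some l :: rest.map some) _ flag skip = _
    rw [pvALoopInh]
    have hre : (done.length : Int) + 1 = ((done ++ [some l]).length : Int) := by simp
    have hd : done ++ some l :: rest.map some = (done ++ [some l]) ++ rest.map some := by simp
    have hcond : (flag && pvAInhCond l) = (flag && !pvBKeep false (PySem.Str.rstrip l)) := by
      simp [pvAInhCond, pvBKeep, bne]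
    split_ifs with h1 h2 h3 h4
    · rw [hd, hre, ih]; simp [pvMark, h1]
    · rw [hd, hre, ih]; simp [pvMark, h1, h2]
    · simp [pvMark, h1, h2, h3]
    · rw [show PySem.List.pySetD (done ++ some l :: rest.map some) (done.length : Int) none
            = (done ++ [none]) ++ rest.map some by
          simp [pvSetLen done (some l) none (rest.map some)]]
      rw [hre]
      have : ((done ++ [some l]).length : Int) = ((done ++ [none]).length : Int) := by simp
      rw [this, ih]
      simp only [pvMark, if_neg h1, if_neg h2, if_neg h3]
      rw [if_pos (hcond ▸ h4)]; simp
    · rw [hd, hre, ih]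
      simp only [pvMark, if_neg h1, if_neg h2, if_neg h3]
      rw [if_neg (hcond ▸ h4)]; simp

-- the block phase of B computes exactly the kept lines of pvMark with flag = true
lemma pvFmSome (a : String) (t : List (Option String)) :
    List.filterMap id (some a :: t) = a :: List.filterMap id t := by simp
lemma pvFmNone (t : List (Option String)) :
    List.filterMap id (none :: t) = List.filterMap id t := by simp
lemma pvFmMap (t : List String) : List.filterMap id (t.map some) = t := by
  simp [List.filterMap_map]

lemma pvMark_block (allMode : Bool) : ∀ (n : Nat) (lines : List String), lines.length ≤ n →
    (pvMark allMode true 0 lines).filterMap id = pvBBlock allMode lines := by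
  intro n
  induction n with
  | zero =>
    intro lines h
    have : lines = [] := by cases lines <;> simp_all
    subst this; simp [pvMark, pvBBlock]
  | succ n ih =>
    intro lines h
    cases lines with
    | nil => simp [pvMark, pvBBlock]
    | cons l rest =>
      rw [pvMark, pvBBlock]
      rw [if_neg (by omega : ¬ ((0 : Int) > 0))]
      by_cases h1 : (PySem.Str.rstrip l == "[TimingPoints]") = true
      · rw [if_pos h1, if_pos h1, pvFmSome]
        cases rest with
        | nil => simp [pvMark, pvBHdrTail]
        | cons nxt rest' =>
          rw [pvMark, if_pos (by omega : (1 : Int) > 0)]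
          rw [show (1 : Int) - 1 = 0 by omega]
          rw [pvFmSome, pvBHdrTail, ih rest' (by simp at h; omega)]
      · rw [if_neg h1, if_neg h1]
        by_cases h2 : (PySem.Str.rstrip l == "") = true
        · rw [if_pos (by simp [h2]), if_pos h2, pvFmSome, pvFmMap]
        · rw [if_neg (by simp [h2]), if_neg h2]
          by_cases h3 : pvBKeep allMode (PySem.Str.rstrip l) = true
          · rw [if_neg (by simp [h3]), if_pos h3, pvFmSome, ih rest (by simp at h; omega)]
          · rw [if_pos (by simp_all), if_neg h3, pvFmNone, ih rest (by simp at h; omega)]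

lemma pvMark_scan (allMode : Bool) (lines : List String) :
    (pvMark allMode false 0 lines).filterMap id = pvBScan allMode lines := by
  induction lines with
  | nil => simp [pvMark, pvBScan]
  | cons l rest ih =>
    rw [pvMark, pvBScan]
    rw [if_neg (by omega : ¬ ((0 : Int) > 0))]
    by_cases h1 : (PySem.Str.rstrip l == "[TimingPoints]") = true
    · rw [if_pos h1, if_pos h1, pvFmSome]
      cases rest with
      | nil => simp [pvMark, pvBHdrTail]
      | cons nxt rest' =>
        rw [pvMark, if_pos (by omega : (1 : Int) > 0)]
        rw [show (1 : Int) - 1 = 0 by omega]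
        rw [pvFmSome, pvBHdrTail, pvMark_block allMode rest'.length rest' (le_refl _)]
    · rw [if_neg h1, if_neg h1]
      rw [if_neg (by simp), if_neg (by simp), pvFmSome, ih]

-- ===== VERDICT (by name: the statement is the Claim_ definition above) =====
theorem any_metadata_remove_sv_spec : Claim_equal_any_metadata_remove_sv := by
  intro opt xs _ hpre
  unfold Spec_any_metadata_remove_sv
  rcases hpre with h | h | ⟨h, _⟩ <;> subst h
  · rw [any_metadata_remove_sv, any_metadata_remove_sv_alt]
    rw [if_pos (by decide : (("none" : String) == "none") = true),
        if_pos (by decide : (("none" : String) == "none") = true)]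
  · rw [any_metadata_remove_sv, any_metadata_remove_sv_alt]
    rw [if_neg (by decide : ¬ (("all" : String) == "none") = true),
        if_pos (by decide : (("all" : String) == "all") = true),
        if_neg (by decide : ¬ (("all" : String) == "none") = true),
        show (("all" : String) == "all") = true from by decide]
    have h0 := pvALoopAll_eq xs [] false 0
    simp only [List.nil_append, List.length_nil, Nat.cast_zero] at h0
    rw [h0]
    unfold pvFilterTruthy
    rw [pvMark_scan]
  · rw [any_metadata_remove_sv, any_metadata_remove_sv_alt]
    rw [if_neg (by decide : ¬ (("inherited_timing_points" : String) == "none") = true),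
        if_neg (by decide : ¬ (("inherited_timing_points" : String) == "all") = true),
        if_pos (by decide : (("inherited_timing_points" : String) == "inherited_timing_points") = true),
        if_neg (by decide : ¬ (("inherited_timing_points" : String) == "none") = true),
        show (("inherited_timing_points" : String) == "all") = false from by decide]
    have h0 := pvALoopInh_eq xs [] false 0
    simp only [List.nil_append, List.length_nil, Nat.cast_zero] at h0
    rw [h0]
    unfold pvFilterTruthy
    rw [pvMark_scan]
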